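-- pv_equiv track=rewrite | github.com/flipcoder/linnstrument-wholetone | midimech.py | rotate_mode
-- ===== SOURCE A (Python) =====
-- import os, sys, glm, copy, binascii, struct, math, traceback, signal
--
-- def rotate_mode(notes, mode):
--     notes = copy.copy(notes)
--     while mode:
--         if notes[0] == 'x':
--             notes = notes[1:] + notes[0]
--         while notes[0] == '.':
--             notes = notes[1:] + notes[0]
--         mode -= 1
--     return notes
-- ===== SOURCE B (Python) =====
-- def rotate_mode(notes, mode):
--     # Track the rotation as an integer offset; detect the offset-orbit's cycle
--     # so huge mode values cost nothing; one final slice builds the result.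
--     n = len(notes)
--     if n == 0 or mode == 0:
--         return notes
--
--     def step(o):
--         if notes[o] == 'x':
--             o = (o + 1) % n
--         while notes[o] == '.':
--             o = (o + 1) % n
--         return o
--
--     seq = []
--     o = 0
--     while o not in seq:
--         seq.append(o)
--         o = step(o)
--     k = len(seq)
--     if mode < k:
--         o = seq[mode]
--     else:
--         s = seq.index(o)
--         c = k - s
--         o = seq[s + (mode - s) % c]
--     return notes[o:] + notes[:o]
-- ===== Notes on version B (the rewrite author's own statement) =====
-- stated objective: faster
-- what changed: A repeatedly rebuilds the string by slicing one rotation at a time for every mode step; B never touches the string during the loop: it tracks the rotation as an integer offset, detects the cycle of the offset orbit (at most len(notes)+1 distinct offsets) so arbitrarily large mode costs O(1) extra, and applies one final slice.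
import Mathlib
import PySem

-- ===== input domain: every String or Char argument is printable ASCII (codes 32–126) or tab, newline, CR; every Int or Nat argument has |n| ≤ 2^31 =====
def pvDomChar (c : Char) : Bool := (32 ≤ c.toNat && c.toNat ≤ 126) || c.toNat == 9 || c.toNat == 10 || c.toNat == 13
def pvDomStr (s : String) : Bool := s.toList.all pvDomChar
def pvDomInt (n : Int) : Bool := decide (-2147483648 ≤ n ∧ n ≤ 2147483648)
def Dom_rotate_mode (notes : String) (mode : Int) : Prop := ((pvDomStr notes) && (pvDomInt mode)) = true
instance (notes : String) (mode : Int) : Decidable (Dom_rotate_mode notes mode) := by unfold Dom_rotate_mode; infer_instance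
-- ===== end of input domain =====

-- B replaces A's repeated string-slicing rotations by an integer offset with
-- orbit/cycle detection and ONE final slice (objective: faster).

-- ===== PORT A =====
-- inner `while notes[0] == '.'` loop; fuel = current length (enough whenever the
-- loop terminates in Python, i.e. some character is not '.')
def pvSkipDotsA : Nat → List Char → List Char
  | 0, cs => cs
  | f + 1, cs =>
    match cs with
    | '.' :: rest => pvSkipDotsA f (rest ++ ['.'])
    | _ => cs

-- A's `if notes[0] == 'x': notes = notes[1:] + notes[0]`
def pvRotX (cs : List Char) : List Char :=
  match cs with
  | 'x' :: rest => rest ++ ['x']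
  | _ => cs

-- one iteration of A's outer `while mode:` body
def pvStepA (cs : List Char) : List Char :=
  pvSkipDotsA (pvRotX cs).length (pvRotX cs)

def pvLoopA : Nat → List Char → List Char
  | 0, cs => cs
  | m + 1, cs => pvLoopA m (pvStepA cs)

def rotate_mode (notes : String) (mode : Int) : String :=
  String.ofList (pvLoopA mode.toNat notes.toList)

-- ===== PORT B =====
-- the inner `while notes[o] == '.'` of Source B's step, on offsets; fuel as above
def pvSkipDotsB (cs : List Char) (n : Nat) : Nat → Nat → Nat
  | 0, o => o
  | f + 1, o => if cs.getD o ' ' = '.' then pvSkipDotsB cs n f ((o + 1) % n) else o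

def pvStepB (cs : List Char) (n : Nat) (o : Nat) : Nat :=
  pvSkipDotsB cs n n (if cs.getD o ' ' = 'x' then (o + 1) % n else o)

-- Source B's `while o not in seq: seq.append(o); o = step(o)`; fuel n+1 always suffices
def pvOrbit (cs : List Char) (n : Nat) : Nat → List Nat → Nat → (List Nat × Nat)
  | 0, seq, o => (seq, o)
  | f + 1, seq, o =>
    if o ∈ seq then (seq, o) else pvOrbit cs n f (seq ++ [o]) (pvStepB cs n o)

def rotate_mode_alt (notes : String) (mode : Int) : String :=
  let cs := notes.toList
  let n := cs.length
  if n = 0 ∨ mode = 0 then notes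
  else
    let p := pvOrbit cs n (n + 1) [] 0
    let seq := p.1
    let k := seq.length
    let m := mode.toNat
    let o := if m < k then seq.getD m 0
             else
               let s := seq.idxOf p.2
               let c := k - s
               seq.getD (s + (m - s) % c) 0
    String.ofList (cs.drop o ++ cs.take o)

-- ===== PRECONDITION & SPEC =====
-- Pre_ excludes exactly the inputs where Python A does not return: mode < 0
-- (the outer while never ends), and mode > 0 with notes empty (IndexError) or
-- all dots (the inner while never ends).
def Pre_rotate_mode (notes : String) (mode : Int) : Prop :=
  mode = 0 ∨ (0 ≤ mode ∧ notes.toList.any (fun c => c ≠ '.') = true)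
instance (notes : String) (mode : Int) : Decidable (Pre_rotate_mode notes mode) := by
  unfold Pre_rotate_mode; infer_instance
def pvWitness_rotate_mode : String × Int := ("C.D.x", 3)

def Spec_rotate_mode (notes : String) (mode : Int) (out : String) : Prop := out = rotate_mode_alt notes mode
instance (notes : String) (mode : Int) (out : String) : Decidable (Spec_rotate_mode notes mode out) := by unfold Spec_rotate_mode; infer_instance

-- ===== CLAIM (what is proved, stated in full; the proofs are below) =====
def Claim_equal_rotate_mode : Prop := ∀ (notes : String) (mode : Int), Dom_rotate_mode notes mode → Pre_rotate_mode notes mode → Spec_rotate_mode notes mode (rotate_mode notes mode)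
-- ===== LEMMAS AND PROOFS =====

theorem pvRotX_cons_x (t : List Char) : pvRotX ('x' :: t) = t ++ ['x'] := rfl

theorem pvRotX_cons_ne (c : Char) (t : List Char) (h : c ≠ 'x') :
    pvRotX (c :: t) = c :: t := by
  unfold pvRotX
  split
  · rename_i rest heq
    exact absurd (by injection heq) h
  · rfl


-- `rot o cs` is the left rotation of cs by o places
def rot (o : Nat) (cs : List Char) : List Char := cs.drop o ++ cs.take o

theorem rot_zero (cs : List Char) : rot 0 cs = cs := by simp [rot]

theorem rot_length (o : Nat) (cs : List Char) : (rot o cs).length = cs.length := by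
  simp [rot]; omega

theorem getD_eq (cs : List Char) (o : Nat) (ho : o < cs.length) :
    cs.getD o ' ' = cs[o] := by
  simp [List.getD, List.getElem?_eq_getElem ho]

theorem rot_head (cs : List Char) (o : Nat) (ho : o < cs.length) :
    rot o cs = cs.getD o ' ' :: (cs.drop (o + 1) ++ cs.take o) := by
  rw [getD_eq cs o ho]
  show cs.drop o ++ cs.take o = _
  have h1 : cs.drop o = cs[o] :: cs.drop (o + 1) := (List.getElem_cons_drop ho).symm
  rw [h1, List.cons_append]

theorem rot_rotl (cs : List Char) (o : Nat) (ho : o < cs.length) :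
    (cs.drop (o + 1) ++ cs.take o) ++ [cs.getD o ' '] = rot ((o + 1) % cs.length) cs := by
  by_cases h : o + 1 < cs.length
  · rw [Nat.mod_eq_of_lt h]
    have h2 : cs.take (o + 1) = cs.take o ++ [cs.getD o ' '] := by
      rw [List.take_add_one, getD_eq cs o ho]
      simp [List.getElem?_eq_getElem ho, Option.toList]
    simp [rot, h2]
  · have hn : o + 1 = cs.length := by omega
    have : (o + 1) % cs.length = 0 := by rw [hn]; simp
    rw [this, rot_zero]
    have h2 : cs.take o ++ [cs.getD o ' '] = cs.take (o + 1) := by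
      rw [List.take_add_one, getD_eq cs o ho]
      simp [List.getElem?_eq_getElem ho, Option.toList]
    have h3 : cs.drop (o + 1) = [] := by
      apply List.drop_eq_nil_of_le; omega
    rw [h3, List.nil_append, h2, hn, List.take_length]

theorem mod_lt_len (cs : List Char) (o : Nat) (hn : 0 < cs.length) :
    (o + 1) % cs.length < cs.length := Nat.mod_lt _ hn

theorem skip_agree (cs : List Char) (f : Nat) :
    ∀ o, o < cs.length →
      pvSkipDotsA f (rot o cs) = rot (pvSkipDotsB cs cs.length f o) cs ∧
      pvSkipDotsB cs cs.length f o < cs.length := by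
  induction f with
  | zero => intro o ho; exact ⟨rfl, ho⟩
  | succ f ih =>
    intro o ho
    have hn : 0 < cs.length := Nat.lt_of_le_of_lt (Nat.zero_le _) ho
    rw [rot_head cs o ho]
    by_cases hd : cs.getD o ' ' = '.'
    · have := ih ((o + 1) % cs.length) (mod_lt_len cs o hn)
      constructor
      · show pvSkipDotsA (f+1) (cs.getD o ' ' :: (cs.drop (o+1) ++ cs.take o)) = _
        rw [hd]
        show pvSkipDotsA f ((cs.drop (o+1) ++ cs.take o) ++ ['.']) = _
        have hr := rot_rotl cs o ho
        rw [hd] at hr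
        rw [hr]
        have h2 := this.1
        rw [h2]
        have hd2 : cs[o]?.getD ' ' = '.' := hd
        simp [pvSkipDotsB, hd2]
      · have hd2 : cs[o]?.getD ' ' = '.' := hd
        simpa [pvSkipDotsB, hd2] using this.2
    · constructor
      · show pvSkipDotsA (f+1) (cs.getD o ' ' :: (cs.drop (o+1) ++ cs.take o)) = _
        have : pvSkipDotsA (f+1) (cs.getD o ' ' :: (cs.drop (o+1) ++ cs.take o))
             = cs.getD o ' ' :: (cs.drop (o+1) ++ cs.take o) := by
          unfold pvSkipDotsA
          split
          · rename_i heq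
            exfalso
            have : cs.getD o ' ' = '.' := by
              have := congrArg (fun l => l.headD ' ') heq
              simpa using this
            exact hd this
          · rfl
        rw [this, ← rot_head cs o ho]
        have hd2 : ¬ cs[o]?.getD ' ' = '.' := hd
        simp [pvSkipDotsB, hd2]
      · have hd2 : ¬ cs[o]?.getD ' ' = '.' := hd
        simpa [pvSkipDotsB, hd2] using ho

theorem step_agree (cs : List Char) (o : Nat) (ho : o < cs.length) :
    pvStepA (rot o cs) = rot (pvStepB cs cs.length o) cs ∧
    pvStepB cs cs.length o < cs.length := by
  have hn : 0 < cs.length := Nat.lt_of_le_of_lt (Nat.zero_le _) ho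
  unfold pvStepA pvStepB
  by_cases hx : cs.getD o ' ' = 'x'
  · have hh := rot_head cs o ho
    have hr := rot_rotl cs o ho
    rw [hx] at hh hr
    have hm : pvRotX (rot o cs) = rot ((o + 1) % cs.length) cs := by
      rw [hh, pvRotX_cons_x]; exact hr
    rw [hm]
    have hlen : (rot ((o + 1) % cs.length) cs).length = cs.length := rot_length _ _
    rw [hlen, if_pos hx]
    exact skip_agree cs cs.length ((o + 1) % cs.length) (mod_lt_len cs o hn)
  · have hh := rot_head cs o ho
    have hm : pvRotX (rot o cs) = rot o cs := by
      rw [hh, pvRotX_cons_ne _ _ hx]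
    rw [hm, rot_length, if_neg hx]
    exact skip_agree cs cs.length o ho

theorem loop_agree (cs : List Char) (m : Nat) :
    ∀ o, o < cs.length →
      pvLoopA m (rot o cs) = rot ((pvStepB cs cs.length)^[m] o) cs ∧
      (pvStepB cs cs.length)^[m] o < cs.length := by
  induction m with
  | zero => intro o ho; exact ⟨rfl, ho⟩
  | succ m ih =>
    intro o ho
    have hs := step_agree cs o ho
    have := ih (pvStepB cs cs.length o) hs.2
    constructor
    · show pvLoopA m (pvStepA (rot o cs)) = _
      rw [hs.1, this.1, Function.iterate_succ_apply]
    · rw [Function.iterate_succ_apply]; exact this.2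

-- ===== orbit (cycle detection) correctness =====

theorem stepB_lt (cs : List Char) (o : Nat) (ho : o < cs.length) :
    pvStepB cs cs.length o < cs.length := by
  have hn : 0 < cs.length := Nat.lt_of_le_of_lt (Nat.zero_le _) ho
  unfold pvStepB
  by_cases hx : cs.getD o ' ' = 'x'
  · rw [if_pos hx]; exact (skip_agree cs cs.length _ (mod_lt_len cs o hn)).2
  · rw [if_neg hx]; exact (skip_agree cs cs.length _ ho).2

theorem iter_lt (cs : List Char) (hn : 0 < cs.length) (i : Nat) :
    (pvStepB cs cs.length)^[i] 0 < cs.length := by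
  induction i with
  | zero => simpa using hn
  | succ i ih =>
    rw [Function.iterate_succ_apply']
    exact stepB_lt cs _ ih

theorem orbit_spec (cs : List Char) (n : Nat) (f : Nat) :
    ∀ j, (∀ i₁ i₂, i₁ < i₂ → i₂ < j → (pvStepB cs n)^[i₁] 0 ≠ (pvStepB cs n)^[i₂] 0) →
    ∃ K, j ≤ K ∧ K ≤ j + f ∧
      pvOrbit cs n f ((List.range j).map (fun i => (pvStepB cs n)^[i] 0)) ((pvStepB cs n)^[j] 0)
        = ((List.range K).map (fun i => (pvStepB cs n)^[i] 0), (pvStepB cs n)^[K] 0) ∧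
      (∀ i₁ i₂, i₁ < i₂ → i₂ < K → (pvStepB cs n)^[i₁] 0 ≠ (pvStepB cs n)^[i₂] 0) ∧
      (K = j + f ∨ ∃ s, s < K ∧ (pvStepB cs n)^[s] 0 = (pvStepB cs n)^[K] 0) := by
  induction f with
  | zero =>
    intro j hinj
    exact ⟨j, Nat.le_refl j, by omega, rfl, hinj, Or.inl (by omega)⟩
  | succ f ih =>
    intro j hinj
    by_cases hmem : (pvStepB cs n)^[j] 0 ∈ (List.range j).map (fun i => (pvStepB cs n)^[i] 0)
    · refine ⟨j, Nat.le_refl j, by omega, ?_, hinj, ?_⟩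
      · unfold pvOrbit; rw [if_pos hmem]
      · right
        obtain ⟨i, hi, hgi⟩ := List.mem_map.mp hmem
        exact ⟨i, List.mem_range.mp hi, hgi⟩
    · have hseq : ((List.range j).map (fun i => (pvStepB cs n)^[i] 0)) ++ [(pvStepB cs n)^[j] 0]
          = (List.range (j + 1)).map (fun i => (pvStepB cs n)^[i] 0) := by
        rw [List.range_succ, List.map_append]; rfl
      have hstep : pvStepB cs n ((pvStepB cs n)^[j] 0) = (pvStepB cs n)^[j + 1] 0 :=
        (Function.iterate_succ_apply' _ _ _).symm
      have hinj' : ∀ i₁ i₂, i₁ < i₂ → i₂ < j + 1 →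
          (pvStepB cs n)^[i₁] 0 ≠ (pvStepB cs n)^[i₂] 0 := by
        intro i₁ i₂ h12 h2
        by_cases h2' : i₂ < j
        · exact hinj i₁ i₂ h12 h2'
        · have : i₂ = j := by omega
          subst this
          intro hcon
          exact hmem (List.mem_map.mpr ⟨i₁, List.mem_range.mpr h12, hcon.symm ▸ rfl⟩)
      obtain ⟨K, h1, h2, h3, h4, h5⟩ := ih (j + 1) hinj'
      refine ⟨K, by omega, by omega, ?_, h4, ?_⟩
      · unfold pvOrbit
        rw [if_neg hmem, hseq, hstep]
        exact h3
      · rcases h5 with h5 | h5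
        · left; omega
        · right; exact h5

theorem orbit_full (cs : List Char) (hn : 0 < cs.length) :
    ∃ K, K ≤ cs.length + 1 ∧
      pvOrbit cs cs.length (cs.length + 1) [] 0
        = ((List.range K).map (fun i => (pvStepB cs cs.length)^[i] 0),
           (pvStepB cs cs.length)^[K] 0) ∧
      (∀ i₁ i₂, i₁ < i₂ → i₂ < K → (pvStepB cs cs.length)^[i₁] 0 ≠ (pvStepB cs cs.length)^[i₂] 0) ∧
      (∃ s, s < K ∧ (pvStepB cs cs.length)^[s] 0 = (pvStepB cs cs.length)^[K] 0) := by
  obtain ⟨K, h1, h2, h3, h4, h5⟩ :=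
    orbit_spec cs cs.length (cs.length + 1) 0 (by intro i₁ i₂ _ h; omega)
  refine ⟨K, by omega, by simpa using h3, h4, ?_⟩
  rcases h5 with h5 | h5
  · exfalso
    have hK : K = cs.length + 1 := by omega
    have hinjOn : Set.InjOn (fun i => (pvStepB cs cs.length)^[i] 0) (Finset.range K) := by
      intro a ha b hb hab
      simp only [Finset.coe_range, Set.mem_Iio] at ha hb
      by_contra hne
      rcases Nat.lt_or_ge a b with h | h
      · exact h4 a b h hb hab
      · exact h4 b a (by omega) ha hab.symm
    have hmaps : ∀ i ∈ Finset.range K, (fun i => (pvStepB cs cs.length)^[i] 0) i ∈ Finset.range cs.length := by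
      intro i _
      exact Finset.mem_range.mpr (iter_lt cs hn i)
    have := Finset.card_le_card_of_injOn _ hmaps hinjOn
    simp [hK] at this
  · exact h5

theorem getD_map_range (g : Nat → Nat) (K i : Nat) (hi : i < K) :
    ((List.range K).map g).getD i 0 = g i := by
  have h : i < ((List.range K).map g).length := by simpa using hi
  rw [List.getD_eq_getElem _ _ h]
  simp

theorem periodic_mod (g : Nat → Nat) (s c : Nat) (hc : 0 < c)
    (hp : ∀ t, g (s + t + c) = g (s + t)) : ∀ t, g (s + t) = g (s + t % c) := by
  intro t
  induction t using Nat.strong_induction_on with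
  | _ t ih =>
    by_cases h : t < c
    · rw [Nat.mod_eq_of_lt h]
    · have ht : t = (t - c) + c := by omega
      have h1 : g (s + t) = g (s + (t - c)) := by
        rw [show s + t = s + (t - c) + c by omega]; exact hp (t - c)
      have h2 := ih (t - c) (by omega)
      have h3 : t % c = (t - c) % c := by
        conv_lhs => rw [ht]
        simp [Nat.add_mod_right]
      rw [h1, h2, h3]

theorem loopA_nil (m : Nat) : pvLoopA m [] = [] := by
  induction m with
  | zero => rfl
  | succ m ih => simpa [pvLoopA, pvStepA, pvRotX, pvSkipDotsA] using ih

theorem rotate_mode_eq (notes : String) (mode : Int) :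
    rotate_mode notes mode = rotate_mode_alt notes mode := by
  simp only [rotate_mode, rotate_mode_alt]
  by_cases h : notes.toList.length = 0 ∨ mode = 0
  · rw [if_pos h]
    rcases h with h | h
    · have hnil : notes.toList = [] := List.length_eq_zero_iff.mp h
      rw [hnil, loopA_nil]
      conv_rhs => rw [← String.ofList_toList (s := notes), hnil]
    · rw [h]
      simp only [Int.toNat_zero, pvLoopA]
      exact String.ofList_toList
  · rw [if_neg h]
    rw [not_or] at h
    obtain ⟨hne, hm0⟩ := h
    have hn : 0 < notes.toList.length := by omega
    obtain ⟨K, hK1, horb, hinj, s₀, hs₀, hrep⟩ := orbit_full notes.toList hn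
    rw [horb]
    have hlen : ((List.range K).map (fun i => (pvStepB notes.toList notes.toList.length)^[i] 0)).length = K := by
      simp
    have hA : pvLoopA mode.toNat notes.toList
        = rot ((pvStepB notes.toList notes.toList.length)^[mode.toNat] 0) notes.toList := by
      have := (loop_agree notes.toList mode.toNat 0 hn).1
      rw [rot_zero] at this
      exact this
    rw [hA]
    set g : Nat → Nat := fun i => (pvStepB notes.toList notes.toList.length)^[i] 0 with hg
    set m : Nat := mode.toNat with hmm
    -- reduce to: the selected index equals g m
    suffices hsuff : (if m < ((List.range K).map g).length then ((List.range K).map g).getD m 0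
        else ((List.range K).map g).getD
          (((List.range K).map g).idxOf (g K) +
            (m - ((List.range K).map g).idxOf (g K)) %
              (((List.range K).map g).length - ((List.range K).map g).idxOf (g K))) 0) = g m by
      rw [hsuff]; rfl
    rw [hlen]
    by_cases hmK : m < K
    · rw [if_pos hmK]
      exact getD_map_range g K m hmK
    · rw [if_neg hmK]
      have hmem : g K ∈ (List.range K).map g :=
        List.mem_map.mpr ⟨s₀, List.mem_range.mpr hs₀, hrep⟩
      set s : Nat := ((List.range K).map g).idxOf (g K) with hs
      have hsK : s < K := by
        have := List.idxOf_lt_length_of_mem hmem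
        rwa [hlen] at this
      have hgs : g s = g K := by
        have h1 : ((List.range K).map g)[s]'(by rw [hlen]; exact hsK) = g K :=
          List.getElem_idxOf (by rw [hlen]; exact hsK)
        simpa using h1.symm ▸ (by simp [hsK] : ((List.range K).map g)[s]'(by rw [hlen]; exact hsK) = g s) ▸ rfl
      set c : Nat := K - s with hc
      have hc0 : 0 < c := by omega
      have hsc : s + c = K := by omega
      have hp : ∀ t, g (s + t + c) = g (s + t) := by
        intro t
        have e1 : s + t + c = t + (s + c) := by omega
        have e2 : g (t + (s + c)) = (pvStepB notes.toList notes.toList.length)^[t] (g (s + c)) := by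
          simp only [hg]
          exact Function.iterate_add_apply _ t (s + c) 0
        have e3 : g (s + t) = (pvStepB notes.toList notes.toList.length)^[t] (g s) := by
          have : s + t = t + s := by omega
          rw [this]
          simp only [hg]
          exact Function.iterate_add_apply _ t s 0
        rw [e1, e2, hsc, ← hgs, ← e3]
      have hper := periodic_mod g s c hc0 hp (m - s)
      have hms : s + (m - s) = m := by omega
      rw [hms] at hper
      have hidx : s + (m - s) % c < K := by
        have := Nat.mod_lt (m - s) hc0
        omega
      rw [getD_map_range g K _ hidx, ← hper]

-- ===== VERDICT (by name: the statement is the Claim_ definition above) =====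
theorem rotate_mode_spec : Claim_equal_rotate_mode := by
  intro notes mode _ _
  show rotate_mode notes mode = rotate_mode_alt notes mode
  exact rotate_mode_eq notes mode
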